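-- pv_equiv track=rewrite | github.com/poxxus/Palindromos | PI/numerosrepetidosV.py | encontrar_elementos_repetidos
-- ===== SOURCE A (Python) =====
-- def encontrar_elementos_repetidos(lista):
--     elementos_repetidos = {}
--
--     for i, elemento in enumerate(lista):
--         if elemento in elementos_repetidos:
--             elementos_repetidos[elemento][1] = i
--         else:
--             elementos_repetidos[elemento] = [i, None]
--
--     elementos_repetidos = {k: v for k, v in elementos_repetidos.items() if v[1] is not None}
--
--     return elementos_repetidos
-- ===== SOURCE B (Python) =====
-- def encontrar_elementos_repetidos(lista):
--     n = len(lista)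
--     invertida = lista[::-1]
--     resultado = {}
--     for elemento in dict.fromkeys(lista):
--         primero = lista.index(elemento)
--         ultimo = n - 1 - invertida.index(elemento)
--         if primero != ultimo:
--             resultado[elemento] = [primero, ultimo]
--     return resultado
-- ===== Notes on version B (the rewrite author's own statement) =====
-- stated objective: alternative
-- what changed: B deduplicates the list first and then, for each distinct element, locates its first occurrence with list.index on the list and its last occurrence with index on the reversed list, keeping it when the two differ, instead of A's single forward pass that maintains a [first, None]-sentinel pair per element and filters on the sentinel.
import Mathlib
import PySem

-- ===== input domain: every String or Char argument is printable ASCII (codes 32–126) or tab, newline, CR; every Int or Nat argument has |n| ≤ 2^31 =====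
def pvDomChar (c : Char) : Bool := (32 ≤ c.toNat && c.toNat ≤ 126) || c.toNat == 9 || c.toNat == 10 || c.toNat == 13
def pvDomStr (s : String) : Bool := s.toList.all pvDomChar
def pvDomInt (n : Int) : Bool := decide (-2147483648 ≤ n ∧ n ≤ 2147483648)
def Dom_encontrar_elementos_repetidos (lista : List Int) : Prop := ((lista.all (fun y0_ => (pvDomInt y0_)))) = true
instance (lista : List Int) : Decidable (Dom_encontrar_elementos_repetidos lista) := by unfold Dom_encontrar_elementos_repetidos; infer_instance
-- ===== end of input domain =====

-- B deduplicates first and then finds each distinct element's first / last occurrence by index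
-- searches on the list and its reverse, instead of A's one-pass [first, None]-sentinel dict;
-- objective: a genuinely different algorithm of similar size (not claimed faster).

-- ===== PORT A =====
-- A's dict values are Python lists [first, None] / [first, last]; ported as Int × Option Int.
def encontrar_elementos_repetidos (lista : List Int) : List (Int × List Int) :=
  let d : PySem.Dict Int (Int × Option Int) :=
    (PySem.List.enumerate lista).foldl
      (fun d p =>
        if d.contains p.2 then
          -- elementos_repetidos[elemento][1] = i  (set slot 1 of the stored pair)
          d.modify p.2 (0, none) (fun v => (v.1, some p.1))
        else
          d.insert p.2 (p.1, none))
      PySem.Dict.empty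
  -- {k: v for k, v in d.items() if v[1] is not None}; the kept pair (a, some b) is the list [a, b]
  (d.items.filter (fun p => p.2.2.isSome)).map (fun p => (p.1, [p.2.1, p.2.2.getD 0]))

-- ===== PORT B =====
def encontrar_elementos_repetidos_alt (lista : List Int) : List (Int × List Int) :=
  let n : Int := lista.length
  -- lista[::-1]; step -1 is never an error, so the option is always some
  let invertida : List Int := (PySem.List.slice? lista none none (-1)).getD []
  let resultado : PySem.Dict Int (List Int) :=
    (PySem.List.dedup lista).foldl
      (fun res elemento =>
        -- elemento comes from the list itself, so .index cannot raise: the default 0 is unreachable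
        let primero : Int := (((PySem.List.index? lista elemento).getD 0 : Nat) : Int)
        let ultimo : Int := n - 1 - (((PySem.List.index? invertida elemento).getD 0 : Nat) : Int)
        if primero ≠ ultimo then res.insert elemento [primero, ultimo] else res)
      PySem.Dict.empty
  resultado.items

-- ===== PRECONDITION & SPEC =====
def Spec_encontrar_elementos_repetidos (lista : List Int) (out : List (Int × List Int)) : Prop := out = encontrar_elementos_repetidos_alt lista
instance (lista : List Int) (out : List (Int × List Int)) : Decidable (Spec_encontrar_elementos_repetidos lista out) := by unfold Spec_encontrar_elementos_repetidos; infer_instance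

-- ===== CLAIM (what is proved, stated in full; the proofs are below) =====
def Claim_equal_encontrar_elementos_repetidos : Prop := ∀ (lista : List Int), Dom_encontrar_elementos_repetidos lista → Spec_encontrar_elementos_repetidos lista (encontrar_elementos_repetidos lista)

-- ===== LEMMAS AND PROOFS =====

-- occurrence-index list of x in l, indices starting at s
def pvOcc (l : List Int) (s : Int) (x : Int) : List Int :=
  ((PySem.List.enumerate l s).filter (fun p => p.2 == x)).map (fun p => p.1)

-- abstraction: the occurrence list seen through A's eyes — (first index, last index if repeated)
def pvPhi (v : List Int) : Int × Option Int :=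
  (PySem.List.pyGetD v 0 0, if 2 ≤ v.length then some (PySem.List.pyGetD v (-1) 0) else none)

def pvMap (d : PySem.Dict Int (List Int)) : PySem.Dict Int (Int × Option Int) :=
  ⟨d.items.map (fun p => (p.1, pvPhi p.2))⟩

theorem pvMap_contains (d : PySem.Dict Int (List Int)) (x : Int) :
    (pvMap d).contains x = d.contains x := by
  simp [pvMap, PySem.Dict.contains, List.any_map, Function.comp_def]

theorem pvMap_keys (d : PySem.Dict Int (List Int)) : (pvMap d).keys = d.keys := by
  simp [pvMap, PySem.Dict.keys, List.map_map, Function.comp_def]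

theorem pvPhi_append (v : List Int) (i : Int) (hv : v ≠ []) :
    pvPhi (v ++ [i]) = ((pvPhi v).1, some i) := by
  have hl : 1 ≤ v.length := List.length_pos_iff.mpr hv
  simp only [pvPhi, PySem.List.pyGetD_neg_one_append_singleton, List.length_append,
    List.length_cons, List.length_nil, PySem.List.pyGetD_zero]
  rw [if_pos (by omega)]
  cases v with
  | nil => exact absurd rfl hv
  | cons a t => simp

theorem pvStep (d : PySem.Dict Int (List Int)) (i x : Int)
    (hnd : d.keys.Nodup) (hne : ∀ p ∈ d.items, p.2 ≠ []) :
    (if (pvMap d).contains x then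
        (pvMap d).modify x (0, none) (fun v => (v.1, some i))
      else (pvMap d).insert x (i, none))
      = pvMap (d.modify x [] (fun ixs => ixs ++ [i])) := by
  rw [pvMap_contains]
  by_cases hc : d.contains x = true
  · have hs : (d.get? x).isSome := by
      rw [← PySem.Dict.contains_eq_isSome_get?]; exact hc
    rcases Option.isSome_iff_exists.mp hs with ⟨v, hv⟩
    have hgd : d.getD x [] = v := PySem.Dict.getD_of_get?_eq_some d [] hv
    have hmem : (x, v) ∈ d.items := PySem.Dict.mem_items_of_get?_eq_some d hv
    have hvne : v ≠ [] := hne _ hmem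
    have hgm : (pvMap d).getD x (0, none) = pvPhi v :=
      PySem.Dict.getD_of_mem_items (pvMap d) (List.mem_map_of_mem hmem)
        (pvMap_keys d ▸ hnd) (0, none)
    have hcA : (pvMap d).contains x = true := by rw [pvMap_contains]; exact hc
    rw [if_pos hc]
    apply PySem.Dict.ext
    simp only [PySem.Dict.modify, hgm, hgd]
    show ((pvMap d).insert x ((pvPhi v).1, some i)).items
        = (pvMap (d.insert x (v ++ [i]))).items
    rw [PySem.Dict.items_insert_of_contains _ _ hcA]
    show _ = (d.insert x (v ++ [i])).items.map (fun p => (p.1, pvPhi p.2))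
    rw [PySem.Dict.items_insert_of_contains _ _ hc]
    simp only [pvMap, List.map_map]
    apply List.map_congr_left
    intro p _
    by_cases hpx : p.1 = x
    · simp [hpx, pvPhi_append _ _ hvne]
    · simp [hpx]
  · have hcf : d.contains x = false := by simpa using hc
    have hcA : (pvMap d).contains x = false := by rw [pvMap_contains]; exact hcf
    rw [if_neg hc]
    apply PySem.Dict.ext
    rw [PySem.Dict.items_insert_of_not_contains _ _ hcA]
    simp only [PySem.Dict.modify, PySem.Dict.getD_of_not_contains d [] hcf]
    show _ = (d.insert x ([] ++ [i])).items.map (fun p => (p.1, pvPhi p.2))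
    rw [PySem.Dict.items_insert_of_not_contains _ _ hcf]
    simp [pvMap, pvPhi, PySem.List.pyGetD_zero]

theorem pvFold (l : List (Int × Int)) (d : PySem.Dict Int (List Int))
    (hnd : d.keys.Nodup) (hne : ∀ p ∈ d.items, p.2 ≠ []) :
    l.foldl
      (fun d p =>
        if d.contains p.2 then d.modify p.2 (0, none) (fun v => (v.1, some p.1))
        else d.insert p.2 (p.1, none))
      (pvMap d)
      = pvMap (l.foldl (fun d p => d.modify p.2 [] (fun ixs => ixs ++ [p.1])) d) := by
  induction l generalizing d with
  | nil => rfl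
  | cons p t ih =>
    simp only [List.foldl_cons]
    rw [pvStep d p.1 p.2 hnd hne]
    apply ih
    · simp only [PySem.Dict.modify]
      exact PySem.Dict.nodup_keys_insert _ _ _ hnd
    · intro q hq
      simp only [PySem.Dict.modify] at hq
      rcases (PySem.Dict.mem_items_insert _ _ _ _).mp hq with h | h
      · subst h; simp
      · exact hne _ h.1

theorem pvOut (items : List (Int × List Int)) :
    ((items.map (fun p => (p.1, pvPhi p.2))).filter (fun p => p.2.2.isSome)).map
        (fun p => (p.1, [p.2.1, p.2.2.getD 0]))
      = (items.filter (fun p => decide (2 ≤ p.2.length))).map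
        (fun p => (p.1, [PySem.List.pyGetD p.2 0 0, PySem.List.pyGetD p.2 (-1) 0])) := by
  induction items with
  | nil => rfl
  | cons p t ih =>
    simp only [List.map_cons, List.filter_cons]
    have h1 : (p.1, pvPhi p.2).2.2.isSome = decide (2 ≤ p.2.length) := by
      by_cases h : 2 ≤ p.2.length <;> simp [pvPhi, h]
    rw [h1]
    by_cases h : 2 ≤ p.2.length
    · simp only [h, decide_true, if_true, List.map_cons, ih]
      congr 1
      simp [pvPhi, h, PySem.List.pyGetD_zero]
    · simp only [h, decide_false, Bool.false_eq_true, if_false, ih]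

-- the grouping dict A's state abstracts
def pvGroup (lista : List Int) : PySem.Dict Int (List Int) :=
  (PySem.List.enumerate lista).foldl (fun d p => d.modify p.2 [] (fun ixs => ixs ++ [p.1]))
    PySem.Dict.empty

theorem pvGroup_nodup (lista : List Int) : (pvGroup lista).keys.Nodup :=
  PySem.Dict.nodup_keys_foldl_modify_key _ _ _ _ _ PySem.Dict.nodup_keys_empty

theorem pvGroup_keys (lista : List Int) : (pvGroup lista).keys = PySem.List.dedup lista := by
  unfold pvGroup
  rw [PySem.Dict.keys_foldl_modify_key]
  simp [PySem.List.map_snd_enumerate, PySem.Dict.keys_empty, PySem.Set.update,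
    PySem.List.dedup_eq_ofList, PySem.Set.ofList]

theorem pvGroup_getD (lista : List Int) (x : Int) :
    (pvGroup lista).getD x [] = pvOcc lista 0 x := by
  unfold pvGroup pvOcc
  rw [show (PySem.List.enumerate lista 0).foldl (fun d p => d.modify p.2 [] (fun ixs => ixs ++ [p.1])) PySem.Dict.empty
      = ((PySem.List.enumerate lista 0).map Prod.swap).foldl (fun d p => d.modify p.1 [] (fun ixs => ixs ++ [p.2])) PySem.Dict.empty
    from by rw [List.foldl_map]; rfl]
  rw [PySem.Dict.getD_foldl_modify_append]
  simp [PySem.Dict.getD_empty, List.filter_map, Function.comp_def, List.map_map]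

theorem pvItems_eq_keys_map {ν : Type} (d : PySem.Dict Int ν) (d0 : ν)
    (h : d.keys.Nodup) : d.items = d.keys.map (fun k => (k, d.getD k d0)) := by
  have h1 : d.items = d.items.map (fun p => (p.1, d.getD p.1 d0)) := by
    rw [List.map_congr_left (g := id) ?_, List.map_id]
    intro p hp
    have := PySem.Dict.getD_of_mem_items d (k := p.1) (v := p.2) (by simpa using hp) h d0
    simp [this]
  conv_lhs => rw [h1]
  simp [PySem.Dict.keys, List.map_map, Function.comp_def]

-- a fold inserting only fresh keys appends its kept entries in order
theorem pvB_items (g h : Int → Int) (l : List Int) (d : PySem.Dict Int (List Int))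
    (hnd : l.Nodup) (hd : ∀ x ∈ l, d.contains x = false) :
    (l.foldl (fun res x => if g x ≠ h x then res.insert x [g x, h x] else res) d).items
      = d.items ++ (l.filter (fun x => decide (g x ≠ h x))).map (fun x => (x, [g x, h x])) := by
  induction l generalizing d with
  | nil => simp
  | cons a t ih =>
    simp only [List.foldl_cons, List.filter_cons]
    have hda : d.contains a = false := hd a (by simp)
    by_cases hc : g a ≠ h a
    · rw [if_pos hc]
      rw [ih _ (List.nodup_cons.mp hnd).2 ?_]
      · rw [PySem.Dict.items_insert_of_not_contains _ _ hda]
        simp [hc]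
      · intro x hx
        have hax : (a = x) = False := by
          simp only [eq_iff_iff, iff_false]
          rintro rfl
          exact (List.nodup_cons.mp hnd).1 hx
        simp [PySem.Dict.contains_insert, hax, hd x (by simp [hx]), Ne.symm]
    · rw [if_neg hc]
      rw [ih _ (List.nodup_cons.mp hnd).2 (fun x hx => hd x (by simp [hx]))]
      simp [hc]

theorem pvOcc_head (l : List Int) (s x : Int) (hx : x ∈ l) :
    (pvOcc l s x).head? = some (s + (((PySem.List.index? l x).getD 0 : Nat) : Int)) := by
  induction l generalizing s with
  | nil => cases hx
  | cons a t ih =>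
    unfold pvOcc
    rw [PySem.List.enumerate_cons]
    by_cases hax : a = x
    · subst hax
      rw [PySem.List.index?_cons_self]
      simp
    · have hxt : x ∈ t := by rcases List.mem_cons.mp hx with h | h; exact absurd h.symm hax; exact h
      rw [PySem.List.index?_cons_of_ne _ hax]
      have hsome : (PySem.List.index? t x).isSome := (PySem.List.index?_isSome_iff t x).mpr hxt
      rcases Option.isSome_iff_exists.mp hsome with ⟨k, hk⟩
      have hih := ih (s := s + 1) hxt
      unfold pvOcc at hih
      rw [List.filter_cons, show (((s, a).2 == x)) = false from by simp [hax]]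
      simp only [Bool.false_eq_true, if_false]
      rw [hih, hk]
      simp only [Option.map_some, Option.getD_some, Option.some.injEq]
      push_cast
      ring

theorem pvOcc_last (l : List Int) (s x : Int) (hx : x ∈ l) :
    (pvOcc l s x).getLast?
      = some (s + l.length - 1 - (((PySem.List.index? l.reverse x).getD 0 : Nat) : Int)) := by
  induction l using List.reverseRecOn generalizing s with
  | nil => cases hx
  | append_singleton t y ih =>
    unfold pvOcc
    rw [PySem.List.enumerate_append, List.filter_append, List.map_append]
    rw [List.reverse_append]
    simp only [List.reverse_singleton, List.singleton_append]
    by_cases hyx : y = x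
    · subst hyx
      rw [PySem.List.index?_cons_self]
      rw [PySem.List.enumerate_cons, PySem.List.enumerate_nil, List.filter_cons]
      simp only [show (((s + (t.length : Int), y).2 == y)) = true from by simp,
        if_true, List.filter_nil, List.map_cons, List.map_nil]
      rw [List.getLast?_concat]
      simp only [Option.getD_some, Option.some.injEq,
        List.length_append, List.length_cons, List.length_nil]
      push_cast
      ring
    · have hxt : x ∈ t := by
        rcases List.mem_append.mp hx with h | h
        · exact h
        · simp at h; exact absurd h.symm hyx
      rw [PySem.List.index?_cons_of_ne _ hyx]
      have hsome : (PySem.List.index? t.reverse x).isSome :=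
        (PySem.List.index?_isSome_iff t.reverse x).mpr (by simpa using hxt)
      rcases Option.isSome_iff_exists.mp hsome with ⟨k, hk⟩
      rw [PySem.List.enumerate_cons, PySem.List.enumerate_nil, List.filter_cons]
      simp only [show (((s + (t.length : Int), y).2 == x)) = false from by simp [hyx],
        Bool.false_eq_true, if_false, List.filter_nil, List.map_nil, List.append_nil]
      have hih := ih (s := s) hxt
      unfold pvOcc at hih
      rw [hih, hk]
      simp only [Option.map_some, Option.getD_some, Option.some.injEq,
        List.length_append, List.length_cons, List.length_nil]
      push_cast
      ring

theorem pvOcc_pairwise (l : List Int) (s x : Int) : (pvOcc l s x).Pairwise (· < ·) := by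
  unfold pvOcc
  exact List.Pairwise.map _ (fun a b h => h) ((PySem.List.pairwise_lt_enumerate l s).filter _)

theorem pvPyGetD_zero_head (o : List Int) (ho : o ≠ []) :
    PySem.List.pyGetD o 0 0 = o.head?.getD 0 := by
  cases o with
  | nil => exact absurd rfl ho
  | cons a t => simp [PySem.List.pyGetD_zero]

theorem pvPyGetD_neg_one_last (o : List Int) (ho : o ≠ []) :
    PySem.List.pyGetD o (-1) 0 = o.getLast?.getD 0 := by
  conv_lhs => rw [← List.dropLast_append_getLast ho]
  rw [PySem.List.pyGetD_neg_one_append_singleton, List.getLast?_eq_some_getLast (h := ho)]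
  rfl

theorem pvHeadLast (o : List Int) (ho : o ≠ []) (hp : o.Pairwise (· < ·)) :
    (o.head?.getD 0 ≠ o.getLast?.getD 0) ↔ 2 ≤ o.length := by
  cases o with
  | nil => exact absurd rfl ho
  | cons a t =>
    cases t with
    | nil => simp
    | cons b u =>
      constructor
      · intro _; simp [List.length_cons]
      · intro _
        have hmem : (b :: u).getLast (by simp) ∈ b :: u := List.getLast_mem _
        have hlt : a < (b :: u).getLast (by simp) := (List.pairwise_cons.mp hp).1 _ hmem
        simp only [List.head?_cons, List.getLast?_cons_cons, Option.getD_some, ne_eq]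
        rw [List.getLast?_eq_some_getLast (h := by simp)]
        simp only [Option.getD_some]
        omega

-- ===== VERDICT (by name: the statement is the Claim_ definition above) =====
theorem encontrar_elementos_repetidos_spec : Claim_equal_encontrar_elementos_repetidos := by
  intro lista _
  show encontrar_elementos_repetidos lista = encontrar_elementos_repetidos_alt lista
  have hA : encontrar_elementos_repetidos lista
      = ((pvGroup lista).items.filter (fun p => decide (2 ≤ p.2.length))).map
          (fun p => (p.1, [PySem.List.pyGetD p.2 0 0, PySem.List.pyGetD p.2 (-1) 0])) := by
    unfold encontrar_elementos_repetidos
    have hempty : (pvMap PySem.Dict.empty) = (PySem.Dict.empty : PySem.Dict Int (Int × Option Int)) := rfl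
    rw [← hempty, pvFold _ _ (by simp [PySem.Dict.keys, PySem.Dict.empty]) (by simp [PySem.Dict.empty])]
    exact pvOut _
  have hitems : (pvGroup lista).items
      = (PySem.List.dedup lista).map (fun x => (x, pvOcc lista 0 x)) := by
    rw [pvItems_eq_keys_map (pvGroup lista) [] (pvGroup_nodup lista), pvGroup_keys]
    exact List.map_congr_left (fun x _ => by rw [pvGroup_getD])
  have hB : encontrar_elementos_repetidos_alt lista
      = ((PySem.List.dedup lista).filter
            (fun x => decide ((((PySem.List.index? lista x).getD 0 : Nat) : Int)
              ≠ (lista.length : Int) - 1 - (((PySem.List.index? lista.reverse x).getD 0 : Nat) : Int)))).map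
          (fun x => (x, [(((PySem.List.index? lista x).getD 0 : Nat) : Int),
            (lista.length : Int) - 1 - (((PySem.List.index? lista.reverse x).getD 0 : Nat) : Int)])) := by
    show ((PySem.List.dedup lista).foldl
        (fun res elemento =>
          if (((PySem.List.index? lista elemento).getD 0 : Nat) : Int)
              ≠ (lista.length : Int) - 1
                - (((PySem.List.index? ((PySem.List.slice? lista none none (-1)).getD []) elemento).getD 0 : Nat) : Int) then
            res.insert elemento [(((PySem.List.index? lista elemento).getD 0 : Nat) : Int),
              (lista.length : Int) - 1
                - (((PySem.List.index? ((PySem.List.slice? lista none none (-1)).getD []) elemento).getD 0 : Nat) : Int)]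
          else res)
        PySem.Dict.empty).items = _
    rw [show (PySem.List.slice? lista none none (-1)).getD ([] : List Int) = lista.reverse
      from by rw [PySem.List.slice?_none_none_neg_one]; rfl]
    rw [pvB_items _ _ _ _ (PySem.List.nodup_dedup lista)
      (fun x _ => by simp [PySem.Dict.contains_empty])]
    simp [PySem.Dict.empty]
  rw [hA, hitems, hB, List.filter_map, List.map_map]
  have hcond : ∀ x ∈ PySem.List.dedup lista,
      ((fun p => decide (2 ≤ p.2.length)) ∘ (fun x => (x, pvOcc lista 0 x))) x
        = (fun x => decide ((((PySem.List.index? lista x).getD 0 : Nat) : Int)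
            ≠ (lista.length : Int) - 1 - (((PySem.List.index? lista.reverse x).getD 0 : Nat) : Int))) x := by
    intro x hx
    have hxl : x ∈ lista := (PySem.List.mem_dedup lista x).mp hx
    have hhd := pvOcc_head lista 0 x hxl
    have hlast := pvOcc_last lista 0 x hxl
    have ho : pvOcc lista 0 x ≠ [] := by
      intro hnil; rw [hnil] at hhd; cases hhd
    have hiff := pvHeadLast _ ho (pvOcc_pairwise lista 0 x)
    simp only [Function.comp_apply]
    rw [hhd] at hiff
    rw [hlast] at hiff
    simp only [Option.getD_some] at hiff
    rw [decide_eq_decide]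
    rw [← hiff]
    constructor <;> intro h' <;> intro heq <;> apply h' <;> omega
  rw [List.filter_congr hcond]
  apply List.map_congr_left
  intro x hx
  have hxl : x ∈ lista := (PySem.List.mem_dedup lista x).mp ((List.mem_filter.mp hx).1)
  have hhd := pvOcc_head lista 0 x hxl
  have hlast := pvOcc_last lista 0 x hxl
  have ho : pvOcc lista 0 x ≠ [] := by
    intro hnil; rw [hnil] at hhd; cases hhd
  simp only [Function.comp_apply]
  rw [pvPyGetD_zero_head _ ho, pvPyGetD_neg_one_last _ ho, hhd, hlast]
  simp only [Option.getD_some, zero_add]
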